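-- pv_equiv track=rewrite | github.com/KarisAya/lika | utils.py | analys_seg
-- ===== SOURCE A (Python) =====
-- def analys_seg(seg_list:list ,ignore: set = set()) -> dict:
--     """
--     分析片段。
--     """
--     ignore = {"done"} | ignore
--     tag = []
--     before = None
--     for seg in seg_list:
--         if seg[0] in ignore:
--             continue
--         elif seg[0] == "before":
--             before = seg[1]
--         else:
--             tag.append(seg)
--     return tag, before
-- ===== SOURCE B (Python) =====
-- def analys_seg(seg_list: list, ignore: set = set()) -> dict:
--     """
--     分析片段。
--     """
--     skip = {"done"} | ignore
--     tag = [seg for seg in seg_list if seg[0] not in skip and seg[0] != "before"]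
--     befores = [seg[1] for seg in seg_list if seg[0] not in skip and seg[0] == "before"]
--     before = befores[-1] if befores else None
--     return tag, before
-- ===== Notes on version B (the rewrite author's own statement) =====
-- stated objective: alternative
-- what changed: The single interleaved loop with mutable state (tag accumulator plus last-wins before variable) is replaced by two independent filtered passes: one comprehension builds tag, a second collects all before-values and the last of that list (default None) is taken.
-- outside the precondition, e.g. on analys_seg([[]], set()): A raises IndexError, B raises IndexError; on analys_seg([['before']], set()): A raises IndexError, B raises IndexError
import Mathlib
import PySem

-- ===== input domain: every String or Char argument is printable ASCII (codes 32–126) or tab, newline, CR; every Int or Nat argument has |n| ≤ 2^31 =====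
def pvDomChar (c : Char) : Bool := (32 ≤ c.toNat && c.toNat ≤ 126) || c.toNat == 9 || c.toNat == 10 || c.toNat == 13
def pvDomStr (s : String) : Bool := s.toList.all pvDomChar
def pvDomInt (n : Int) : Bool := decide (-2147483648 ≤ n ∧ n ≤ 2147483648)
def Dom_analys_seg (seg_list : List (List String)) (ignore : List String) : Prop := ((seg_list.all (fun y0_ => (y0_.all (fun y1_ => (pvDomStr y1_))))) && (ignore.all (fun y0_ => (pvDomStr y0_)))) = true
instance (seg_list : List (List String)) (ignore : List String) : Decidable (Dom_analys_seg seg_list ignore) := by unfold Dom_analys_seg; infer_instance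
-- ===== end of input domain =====

-- B replaces A's single interleaved loop by two independent filtered passes (tag filter, then
-- last-wins before extraction); objective: alternative decomposition, same O(n) cost.


-- ===== PORT A =====
-- one loop step of A; seg[0] / seg[1] are pyGetD with default "" — Pre_ excludes the inputs
-- where Python would raise IndexError there, so the default is never the value used.
def aStep (ignore : List String) (st : List (List String) × Option String)
    (seg : List String) : List (List String) × Option String :=
  let s0 := PySem.List.pyGetD seg 0 ""                      -- seg[0]
  if s0 ∈ ("done" :: ignore) then st                        -- ignore = {"done"} | ignore; continue
  else if s0 = "before" then (st.1, some (PySem.List.pyGetD seg 1 ""))  -- before = seg[1]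
  else (st.1 ++ [seg], st.2)                                -- tag.append(seg)

def analys_seg (seg_list : List (List String)) (ignore : List String) :
    List (List String) × Option String :=
  seg_list.foldl (aStep ignore) ([], none)

-- ===== PORT B =====
def bKeep (ignore : List String) (seg : List String) : Bool :=
  !(("done" :: ignore).contains (PySem.List.pyGetD seg 0 "")) &&
    (PySem.List.pyGetD seg 0 "" != "before")

def bBefore (ignore : List String) (seg : List String) : Bool :=
  !(("done" :: ignore).contains (PySem.List.pyGetD seg 0 "")) &&
    (PySem.List.pyGetD seg 0 "" == "before")

def analys_seg_alt (seg_list : List (List String)) (ignore : List String) :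
    List (List String) × Option String :=
  let tag := seg_list.filter (bKeep ignore)
  let befores := (seg_list.filter (bBefore ignore)).map (fun seg => PySem.List.pyGetD seg 1 "")
  (tag, befores.getLast?)                                   -- befores[-1] if befores else None

-- ===== PRECONDITION & SPEC =====
-- exactly where Python A returns: no empty segment (seg[0] raises IndexError) and every
-- non-ignored "before" segment has a second element (seg[1] raises IndexError).
def Pre_analys_seg (seg_list : List (List String)) (ignore : List String) : Prop :=
  ∀ seg ∈ seg_list, seg ≠ [] ∧
    (seg.headD "" = "before" → "before" ∈ ignore ∨ 2 ≤ seg.length)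
instance (seg_list : List (List String)) (ignore : List String) :
    Decidable (Pre_analys_seg seg_list ignore) := by unfold Pre_analys_seg; infer_instance

def pvWitness_analys_seg : List (List String) × List String :=
  ([["before", "x"], ["a", "y"], ["done", "z"], ["before", "w"], ["b"]], ["a"])

def Spec_analys_seg (seg_list : List (List String)) (ignore : List String)
    (out : List (List String) × Option String) : Prop := out = analys_seg_alt seg_list ignore
instance (seg_list : List (List String)) (ignore : List String)
    (out : List (List String) × Option String) : Decidable (Spec_analys_seg seg_list ignore out) := by
  unfold Spec_analys_seg; infer_instance

-- ===== CLAIM (what is proved, stated in full; the proofs are below) =====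
def Claim_equal_analys_seg : Prop := ∀ (seg_list : List (List String)) (ignore : List String), Dom_analys_seg seg_list ignore → Pre_analys_seg seg_list ignore → Spec_analys_seg seg_list ignore (analys_seg seg_list ignore)

-- ===== LEMMAS AND PROOFS =====

theorem or_getLast?_cons {α : Type} (x : α) (xs : List α) (b : Option α) :
    ((x :: xs).getLast?).or b = (xs.getLast?).or (some x) := by
  cases xs with
  | nil => simp
  | cons y ys =>
    rw [List.getLast?_cons_cons]
    rcases List.getLast?_isSome.mpr (by simp : (y :: ys) ≠ []) |> Option.isSome_iff_exists.mp
      with ⟨v, hv⟩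
    simp [hv]

theorem loop_eq (ignore : List String) (l : List (List String))
    (acc : List (List String)) (b : Option String) :
    l.foldl (aStep ignore) (acc, b) =
      (acc ++ l.filter (bKeep ignore),
       (((l.filter (bBefore ignore)).map (fun seg => PySem.List.pyGetD seg 1 "")).getLast?).or b) := by
  induction l generalizing acc b with
  | nil => simp
  | cons seg rest ih =>
    by_cases hmem : PySem.List.pyGetD seg 0 "" ∈ ("done" :: ignore)
    · have hstep : aStep ignore (acc, b) seg = (acc, b) := by simp [aStep, hmem]
      have hk : bKeep ignore seg = false := by simp [bKeep, hmem]
      have hb : bBefore ignore seg = false := by simp [bBefore, hmem]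
      rw [List.foldl_cons, hstep, ih, List.filter_cons_of_neg (by simp [hk]),
        List.filter_cons_of_neg (by simp [hb])]
    · have hmem' : PySem.List.pyGetD seg 0 "" ≠ "done" ∧ PySem.List.pyGetD seg 0 "" ∉ ignore := by
        simpa [not_or] using hmem
      by_cases hbef : PySem.List.pyGetD seg 0 "" = "before"
      · have hni : "before" ∉ ignore := hbef ▸ hmem'.2
        have hstep : aStep ignore (acc, b) seg = (acc, some (PySem.List.pyGetD seg 1 "")) := by
          simp [aStep, hbef, hni]
        have hk : bKeep ignore seg = false := by simp [bKeep, hbef]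
        have hb : bBefore ignore seg = true := by simp [bBefore, hbef, hni]
        rw [List.foldl_cons, hstep, ih, List.filter_cons_of_neg (by simp [hk]),
          List.filter_cons_of_pos hb, List.map_cons, or_getLast?_cons]
      · have hstep : aStep ignore (acc, b) seg = (acc ++ [seg], b) := by
          simp [aStep, hmem, hbef]
        have hk : bKeep ignore seg = true := by
          simp [bKeep, hbef, hmem'.1, hmem'.2]
        have hb : bBefore ignore seg = false := by simp [bBefore, hbef]
        rw [List.foldl_cons, hstep, ih, List.filter_cons_of_pos hk,
          List.filter_cons_of_neg (by simp [hb])]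
        simp

-- ===== VERDICT (by name: the statement is the Claim_ definition above) =====
theorem analys_seg_spec : Claim_equal_analys_seg := by
  intro seg_list ignore _ _
  unfold Spec_analys_seg analys_seg analys_seg_alt
  rw [loop_eq]
  simp
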